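-- pv_equiv track=rewrite | github.com/debpalash/OmniVoice-Studio | backend/services/subtitle_segmenter.py | format_subtitle_lines
-- ===== SOURCE A (Python) =====
-- MAX_CHARS_PER_LINE = 42   # Netflix single-line cap
--
-- MAX_LINES         = 2     # Netflix hard cap (we still prefer 1)
--
-- def format_subtitle_lines(text: str, max_chars: int = MAX_CHARS_PER_LINE) -> list[str]:
--     """
--     Greedy word-wrap text into ≤ MAX_LINES lines of ≤ max_chars each. Returns
--     the list of lines. If text is inherently too long, the last line overflows
--     rather than truncating.
--     """
--     words = text.split()
--     lines: list[str] = [""]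
--     for w in words:
--         tentative = f"{lines[-1]} {w}".strip() if lines[-1] else w
--         if len(tentative) <= max_chars:
--             lines[-1] = tentative
--             continue
--         if len(lines) < MAX_LINES:
--             lines.append(w)
--         else:
--             # Last line — append with a space, accept the overflow.
--             lines[-1] = f"{lines[-1]} {w}".strip()
--     return [l for l in lines if l]
-- ===== SOURCE B (Python) =====
-- MAX_CHARS_PER_LINE = 42
--
-- MAX_LINES = 2
--
--
-- def format_subtitle_lines(text: str, max_chars: int = MAX_CHARS_PER_LINE) -> list[str]:
--     """Split-point decomposition: count how many leading words fit greedily on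
--     line 1 (by length arithmetic, no string building), then join the two
--     slices at once and drop empty lines."""
--     words = text.split()
--     split = 0
--     width = 0
--     for w in words:
--         need = len(w) if split == 0 else width + 1 + len(w)
--         if need > max_chars:
--             break
--         width = need
--         split += 1
--     line1 = " ".join(words[:split])
--     line2 = " ".join(words[split:])
--     return [l for l in (line1, line2) if l]
-- ===== Notes on version B (the rewrite author's own statement) =====
-- stated objective: simpler
-- what changed: Replaced the list-of-lines state machine (mutating lines[-1], MAX_LINES branching, strip on f-strings) by a split-point decomposition: one arithmetic loop counts the leading words that fit on line 1, then the two lines are produced by two joins over slices and empties are dropped.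
import Mathlib
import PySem

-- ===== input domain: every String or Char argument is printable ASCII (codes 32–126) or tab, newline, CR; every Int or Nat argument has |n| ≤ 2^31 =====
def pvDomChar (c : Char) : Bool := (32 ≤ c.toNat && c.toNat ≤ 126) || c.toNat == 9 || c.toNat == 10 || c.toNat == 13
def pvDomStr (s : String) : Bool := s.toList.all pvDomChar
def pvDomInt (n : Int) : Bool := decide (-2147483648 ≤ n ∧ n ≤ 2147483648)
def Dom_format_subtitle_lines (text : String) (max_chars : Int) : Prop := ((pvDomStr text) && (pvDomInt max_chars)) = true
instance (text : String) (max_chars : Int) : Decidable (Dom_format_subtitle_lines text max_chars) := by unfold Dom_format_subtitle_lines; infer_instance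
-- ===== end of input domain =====

-- B replaces A's list-of-lines state machine by a split-point decomposition (count the
-- leading words that fit on line 1 by length arithmetic, then two joins); objective: simpler.

-- ===== PORT A =====
-- one iteration of A's `for w in words` loop over the mutable `lines` list
def fslStep (max_chars : Int) (lines : List (List Char)) (w : List Char) : List (List Char) :=
  let last := PySem.List.pyGetD lines (-1) []          -- lines[-1]
  let tentative := if last = [] then w                 -- `if lines[-1]` truthiness
    else PySem.Chars.strip (last ++ ' ' :: w)          -- f"{lines[-1]} {w}".strip()
  if PySem.Chars.len tentative ≤ max_chars then
    lines.dropLast ++ [tentative]                      -- lines[-1] = tentative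
  else if (lines.length : Int) < 2 then                -- len(lines) < MAX_LINES
    lines ++ [w]
  else
    lines.dropLast ++ [PySem.Chars.strip (last ++ ' ' :: w)]

def format_subtitle_lines (text : String) (max_chars : Int) : List String :=
  let words := PySem.Chars.split₀ text.toList          -- text.split()
  let lines := words.foldl (fslStep max_chars) [[]]
  (lines.filter (fun l => !l.isEmpty)).map (fun l => String.ofList l)

-- ===== PORT B =====
-- Source B's counting loop (with break) as structural recursion: width/split accumulators
def altSplit (max_chars : Int) : List (List Char) → Int → Nat → Nat
  | [], _, k => k
  | w :: ws, width, k =>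
    let need := if k = 0 then PySem.Chars.len w else width + 1 + PySem.Chars.len w
    if max_chars < need then k                         -- need > max_chars: break
    else altSplit max_chars ws need (k + 1)

def format_subtitle_lines_alt (text : String) (max_chars : Int) : List String :=
  let words := PySem.Chars.split₀ text.toList          -- text.split()
  let k := altSplit max_chars words 0 0
  let line1 := PySem.Chars.join [' '] (List.take k words)   -- " ".join(words[:k]), 0 ≤ k ≤ len
  let line2 := PySem.Chars.join [' '] (List.drop k words)   -- " ".join(words[k:])
  ([line1, line2].filter (fun l => !l.isEmpty)).map (fun l => String.ofList l)

-- ===== PRECONDITION & SPEC =====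
def Spec_format_subtitle_lines (text : String) (max_chars : Int) (out : List String) : Prop := out = format_subtitle_lines_alt text max_chars
instance (text : String) (max_chars : Int) (out : List String) : Decidable (Spec_format_subtitle_lines text max_chars out) := by unfold Spec_format_subtitle_lines; infer_instance

-- ===== CLAIM (what is proved, stated in full; the proofs are below) =====
def Claim_equal_format_subtitle_lines : Prop := ∀ (text : String) (max_chars : Int), Dom_format_subtitle_lines text max_chars → Spec_format_subtitle_lines text max_chars (format_subtitle_lines text max_chars)

-- ===== LEMMAS AND PROOFS =====

-- a word produced by str.split(): nonempty, no whitespace characters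
def GoodW (w : List Char) : Prop := w ≠ [] ∧ ∀ c ∈ w, PySem.Chars.isspace c = false

lemma good_revcur (cur : List Char) (h : cur ≠ [])
    (hcur : ∀ c ∈ cur, PySem.Chars.isspace c = false) : GoodW cur.reverse := by
  refine ⟨by simpa using h, ?_⟩
  intro c hc
  exact hcur c (by simpa using hc)

lemma split₀_go_good (s : List Char) : ∀ (cur : List Char) (acc : List (List Char)),
    (∀ c ∈ cur, PySem.Chars.isspace c = false) →
    (∀ w ∈ acc, GoodW w) →
    ∀ w ∈ PySem.Chars.split₀.go s cur acc, GoodW w := by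
  induction s with
  | nil =>
    intro cur acc hcur hacc w hw
    by_cases h : cur.isEmpty
    · simp [PySem.Chars.split₀.go, h] at hw
      exact hacc w hw
    · have hc : cur ≠ [] := by intro hnil; rw [hnil] at h; simp at h
      simp [PySem.Chars.split₀.go, h] at hw
      have hw' : w = cur.reverse ∨ w ∈ acc := by tauto
      rcases hw' with rfl | hw'
      · exact good_revcur cur hc hcur
      · exact hacc w hw'
  | cons c rest ih =>
    intro cur acc hcur hacc w hw
    by_cases hs : PySem.Chars.isspace c
    · by_cases h : cur.isEmpty
      · simp only [PySem.Chars.split₀.go, hs, h, if_true] at hw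
        exact ih [] acc (by simp) hacc w hw
      · have hc : cur ≠ [] := by intro hnil; rw [hnil] at h; simp at h
        simp only [PySem.Chars.split₀.go, hs, h, if_true, Bool.false_eq_true, if_false] at hw
        refine ih [] _ (by simp) ?_ w hw
        intro v hv
        rcases List.mem_cons.mp hv with rfl | hv
        · exact good_revcur cur hc hcur
        · exact hacc v hv
    · simp only [PySem.Chars.split₀.go, hs, Bool.false_eq_true, if_false] at hw
      refine ih (c :: cur) acc ?_ hacc w hw
      intro d hd
      rcases List.mem_cons.mp hd with rfl | hd
      · simpa using hs
      · exact hcur d hd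

lemma split₀_good (cs : List Char) : ∀ w ∈ PySem.Chars.split₀ cs, GoodW w := by
  simpa [PySem.Chars.split₀] using split₀_go_good cs [] [] (by simp) (by simp)

lemma good_append (b : List (List Char)) (w : List Char)
    (hb : ∀ v ∈ b, GoodW v) (hw : GoodW w) : ∀ v ∈ b ++ [w], GoodW v := by
  intro v hv
  rcases List.mem_append.mp hv with h | h
  · exact hb v h
  · simp at h; subst h; exact hw

-- join facts (J := PySem.Chars.join [' '])
lemma J_append_singleton (a : List (List Char)) (w : List Char) (ha : a ≠ []) :
    PySem.Chars.join [' '] (a ++ [w]) = PySem.Chars.join [' '] a ++ ' ' :: w := by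
  induction a with
  | nil => simp at ha
  | cons x t ih =>
    cases t with
    | nil => simp [PySem.Chars.join, List.intercalate]
    | cons y u =>
      have h := ih (by simp)
      show PySem.Chars.join [' '] (x :: (y :: (u ++ [w])))
          = PySem.Chars.join [' '] (x :: y :: u) ++ ' ' :: w
      rw [PySem.Chars.join_cons_cons, PySem.Chars.join_cons_cons]
      rw [List.cons_append] at h
      rw [h]
      simp

lemma J_head (a : List (List Char)) (ha : a ≠ []) (hg : ∀ w ∈ a, GoodW w) :
    ∃ c t, PySem.Chars.join [' '] a = c :: t ∧ PySem.Chars.isspace c = false := by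
  cases a with
  | nil => simp at ha
  | cons w rest =>
    obtain ⟨hw, hcs⟩ := hg w (by simp)
    obtain ⟨c, t, hct⟩ := List.exists_cons_of_ne_nil hw
    have hrw : ∃ r, PySem.Chars.join [' '] (w :: rest) = w ++ r := by
      cases rest with
      | nil => exact ⟨[], by simp [PySem.Chars.join_singleton]⟩
      | cons y u => exact ⟨[' '] ++ PySem.Chars.join [' '] (y :: u), by rw [PySem.Chars.join_cons_cons]; simp⟩
    obtain ⟨r, hr⟩ := hrw
    subst hct
    exact ⟨c, t ++ r, by simp [hr], hcs c (by simp)⟩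

lemma J_ne_nil (a : List (List Char)) (ha : a ≠ []) (hg : ∀ w ∈ a, GoodW w) :
    PySem.Chars.join [' '] a ≠ [] := by
  obtain ⟨c, t, h, -⟩ := J_head a ha hg
  simp [h]

lemma strip_mid (a w : List Char)
    (ha : ∃ c t, a = c :: t ∧ PySem.Chars.isspace c = false)
    (hw : ∃ u d, w = u ++ [d] ∧ PySem.Chars.isspace d = false) :
    PySem.Chars.strip (a ++ ' ' :: w) = a ++ ' ' :: w := by
  obtain ⟨c, t, rfl, hc⟩ := ha
  obtain ⟨u, d, rfl, hd⟩ := hw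
  show PySem.Chars.strip (c :: (t ++ ' ' :: (u ++ [d]))) = c :: (t ++ ' ' :: (u ++ [d]))
  have h1 : PySem.Chars.lstrip (c :: (t ++ ' ' :: (u ++ [d])))
      = c :: (t ++ ' ' :: (u ++ [d])) := by
    simp [PySem.Chars.lstrip, hc]
  have h2 : PySem.Chars.rstrip (c :: (t ++ ' ' :: (u ++ [d])))
      = c :: (t ++ ' ' :: (u ++ [d])) := by
    simp [PySem.Chars.rstrip, List.reverse_append, hd]
  show PySem.Chars.rstrip (PySem.Chars.lstrip _) = _
  rw [h1, h2]

lemma strip_J_word (a : List (List Char)) (w : List Char)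
    (ha : a ≠ []) (hga : ∀ v ∈ a, GoodW v) (hw : GoodW w) :
    PySem.Chars.strip (PySem.Chars.join [' '] a ++ ' ' :: w)
      = PySem.Chars.join [' '] a ++ ' ' :: w := by
  refine strip_mid _ _ (J_head a ha hga) ?_
  obtain ⟨hw1, hw2⟩ := hw
  obtain ⟨u, d, hud⟩ := List.eq_nil_or_concat w |>.resolve_left hw1
  rw [List.concat_eq_append] at hud
  exact ⟨u, d, hud, hw2 d (by simp [hud])⟩

lemma len_append_word (x w : List Char) :
    PySem.Chars.len (x ++ ' ' :: w) = PySem.Chars.len x + 1 + PySem.Chars.len w := by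
  simp [PySem.Chars.len]
  ring

-- the number of further words the greedy loop packs onto line 1, given current width n
def fitCount (m : Int) : Int → List (List Char) → Nat
  | _, [] => 0
  | n, w :: ws =>
    if m < n + 1 + PySem.Chars.len w then 0
    else fitCount m (n + 1 + PySem.Chars.len w) ws + 1

lemma fitCount_cons (m n : Int) (w : List Char) (ws : List (List Char)) :
    fitCount m n (w :: ws)
      = if m < n + 1 + PySem.Chars.len w then 0
        else fitCount m (n + 1 + PySem.Chars.len w) ws + 1 := by
  simp [fitCount]

lemma altSplit_cons_succ (m n : Int) (k : Nat) (w : List Char) (ws : List (List Char)) :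
    altSplit m (w :: ws) n (k + 1)
      = if m < n + 1 + PySem.Chars.len w then k + 1
        else altSplit m ws (n + 1 + PySem.Chars.len w) (k + 2) := by
  simp [altSplit]

lemma altSplit_succ (m : Int) : ∀ (ws : List (List Char)) (n : Int) (k : Nat),
    altSplit m ws n (k + 1) = (k + 1) + fitCount m n ws := by
  intro ws
  induction ws with
  | nil => intro n k; simp [altSplit, fitCount]
  | cons w t ih =>
    intro n k
    rw [altSplit_cons_succ, fitCount_cons]
    split_ifs with h
    · omega
    · rw [show k + 2 = (k + 1) + 1 from rfl, ih]
      omega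

-- one step of A's loop, two-line state (the second line absorbs every word)
lemma step_two (m : Int) (l1 : List Char) (b : List (List Char)) (w : List Char)
    (hb : b ≠ []) (hgb : ∀ v ∈ b, GoodW v) (hw : GoodW w) :
    fslStep m [l1, PySem.Chars.join [' '] b] w = [l1, PySem.Chars.join [' '] (b ++ [w])] := by
  have hne := J_ne_nil b hb hgb
  have hstrip := strip_J_word b w hb hgb hw
  have hlast : PySem.List.pyGetD [l1, PySem.Chars.join [' '] b] (-1) [] = PySem.Chars.join [' '] b := by
    simpa using PySem.List.pyGetD_neg_one_append_singleton [l1] (PySem.Chars.join [' '] b) []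
  simp only [fslStep, hlast]
  rw [if_neg hne, hstrip, J_append_singleton b w hb]
  split_ifs with h1 h2
  · simp
  · exfalso; simp at h2
  · simp

lemma phase2 (m : Int) : ∀ (rest : List (List Char)) (l1 : List Char) (b : List (List Char)),
    b ≠ [] → (∀ v ∈ b, GoodW v) → (∀ v ∈ rest, GoodW v) →
    rest.foldl (fslStep m) [l1, PySem.Chars.join [' '] b]
      = [l1, PySem.Chars.join [' '] (b ++ rest)] := by
  intro rest
  induction rest with
  | nil => intro l1 b hb hgb _; simp
  | cons w t ih =>
    intro l1 b hb hgb hgr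
    rw [List.foldl_cons, step_two m l1 b w hb hgb (hgr w (by simp))]
    rw [ih l1 (b ++ [w]) (by simp) (good_append b w hgb (hgr w (by simp)))
        (fun v hv => hgr v (by simp [hv]))]
    simp

-- one step of A's loop, one-line state with nonempty line 1
lemma step_one (m : Int) (a : List (List Char)) (w : List Char)
    (ha : a ≠ []) (hga : ∀ v ∈ a, GoodW v) (hw : GoodW w) :
    fslStep m [PySem.Chars.join [' '] a] w
      = if PySem.Chars.len (PySem.Chars.join [' '] a) + 1 + PySem.Chars.len w ≤ m then
          [PySem.Chars.join [' '] (a ++ [w])]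
        else [PySem.Chars.join [' '] a, w] := by
  have hne := J_ne_nil a ha hga
  have hstrip := strip_J_word a w ha hga hw
  have hlast : PySem.List.pyGetD [PySem.Chars.join [' '] a] (-1) [] = PySem.Chars.join [' '] a := by
    simpa using PySem.List.pyGetD_neg_one_append_singleton [] (PySem.Chars.join [' '] a) []
  simp only [fslStep, hlast]
  rw [if_neg hne, hstrip, len_append_word, J_append_singleton a w ha]
  split_ifs with h1 h2
  · simp
  · simp
  · exfalso; simp at h2

-- one step of A's loop from the initial state [""]
lemma step_zero (m : Int) (w : List Char) :
    fslStep m [[]] w = if PySem.Chars.len w ≤ m then [w] else [[], w] := by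
  have hlast : PySem.List.pyGetD [([] : List Char)] (-1) [] = [] := rfl
  simp [fslStep, hlast]

-- A's loop from a nonempty line 1 = split-point form via fitCount
lemma phase1 (m : Int) : ∀ (rest a : List (List Char)),
    a ≠ [] → (∀ v ∈ a, GoodW v) → (∀ v ∈ rest, GoodW v) →
    rest.foldl (fslStep m) [PySem.Chars.join [' '] a]
      = (if fitCount m (PySem.Chars.len (PySem.Chars.join [' '] a)) rest = rest.length then
           [PySem.Chars.join [' '] (a ++ rest)]
         else
           [PySem.Chars.join [' '] (a ++ rest.take (fitCount m (PySem.Chars.len (PySem.Chars.join [' '] a)) rest)),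
            PySem.Chars.join [' '] (rest.drop (fitCount m (PySem.Chars.len (PySem.Chars.join [' '] a)) rest))]) := by
  intro rest
  induction rest with
  | nil => intro a ha hga _; simp [fitCount]
  | cons w t ih =>
    intro a ha hga hgr
    have hw : GoodW w := hgr w (by simp)
    have hlen' : PySem.Chars.len (PySem.Chars.join [' '] a) + 1 + PySem.Chars.len w
        = PySem.Chars.len (PySem.Chars.join [' '] (a ++ [w])) := by
      rw [J_append_singleton a w ha, len_append_word]
    rw [List.foldl_cons, step_one m a w ha hga hw]
    by_cases hfit : PySem.Chars.len (PySem.Chars.join [' '] a) + 1 + PySem.Chars.len w ≤ m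
    · -- w joins line 1
      have hfc : fitCount m (PySem.Chars.len (PySem.Chars.join [' '] a)) (w :: t)
          = fitCount m (PySem.Chars.len (PySem.Chars.join [' '] (a ++ [w]))) t + 1 := by
        rw [fitCount_cons, if_neg (by omega), hlen']
      rw [if_pos hfit, hfc,
          ih (a ++ [w]) (by simp) (good_append a w hga hw) (fun v hv => hgr v (by simp [hv]))]
      by_cases hall : fitCount m (PySem.Chars.len (PySem.Chars.join [' '] (a ++ [w]))) t = t.length
      · rw [if_pos hall, if_pos (by rw [List.length_cons, hall])]
        simp [List.append_assoc]
      · rw [if_neg hall, if_neg (by rw [List.length_cons]; omega),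
            List.take_succ_cons, List.drop_succ_cons]
        simp [List.append_assoc]
    · -- w opens line 2; everything else lands there
      have hfc0 : fitCount m (PySem.Chars.len (PySem.Chars.join [' '] a)) (w :: t) = 0 := by
        rw [fitCount_cons, if_pos (by omega)]
      rw [if_neg hfit, hfc0, if_neg (by simp)]
      have h2 : ([PySem.Chars.join [' '] a, w] : List (List Char))
          = [PySem.Chars.join [' '] a, PySem.Chars.join [' '] [w]] := by
        simp [PySem.Chars.join_singleton]
      rw [h2, phase2 m t _ [w] (by simp)
          (by intro v hv; rw [List.mem_singleton] at hv; subst hv; exact hw)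
          (fun v hv => hgr v (by simp [hv]))]
      simp

lemma filter_single (x : List Char) :
    [x].filter (fun l => !l.isEmpty) = if x = [] then [] else [x] := by
  cases x <;> simp [List.filter]

lemma filter_pair (x y : List Char) :
    [x, y].filter (fun l => !l.isEmpty)
      = (if x = [] then [] else [x]) ++ (if y = [] then [] else [y]) := by
  cases x <;> cases y <;> simp [List.filter]

-- the filtered line lists of the two ports agree, for any good word list
lemma core (m : Int) (ws : List (List Char)) (hgood : ∀ w ∈ ws, GoodW w) :
    (ws.foldl (fslStep m) [[]]).filter (fun l => !l.isEmpty)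
      = ([PySem.Chars.join [' '] (List.take (altSplit m ws 0 0) ws),
          PySem.Chars.join [' '] (List.drop (altSplit m ws 0 0) ws)].filter (fun l => !l.isEmpty)) := by
  cases ws with
  | nil => rfl
  | cons w ws =>
    have hw : GoodW w := hgood w (by simp)
    have hgws : ∀ v ∈ ws, GoodW v := fun v hv => hgood v (by simp [hv])
    have hA0 : altSplit m (w :: ws) 0 0
        = if m < PySem.Chars.len w then 0 else altSplit m ws (PySem.Chars.len w) 1 := by
      simp [altSplit]
    rw [List.foldl_cons, step_zero]
    by_cases h0 : PySem.Chars.len w ≤ m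
    · -- first word fits: line 1 starts as [w]
      rw [if_pos h0]
      have hk : altSplit m (w :: ws) 0 0 = 1 + fitCount m (PySem.Chars.len w) ws := by
        rw [hA0, if_neg (by omega)]
        simpa using altSplit_succ m ws (PySem.Chars.len w) 0
      rw [hk]
      have hJw : PySem.Chars.join [' '] [w] = w := by simp [PySem.Chars.join_singleton]
      have hp := phase1 m ws [w] (by simp)
        (by intro v hv; rw [List.mem_singleton] at hv; subst hv; exact hw) hgws
      rw [show PySem.Chars.len (PySem.Chars.join [' '] [w]) = PySem.Chars.len w from by rw [hJw]] at hp
      have hI : ([w] : List (List Char)) = [PySem.Chars.join [' '] [w]] := by rw [hJw]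
      conv_lhs => rw [hI]
      rw [hp]
      by_cases hall : fitCount m (PySem.Chars.len w) ws = ws.length
      · -- everything fits on line 1; B's empty line 2 is filtered out
        rw [if_pos hall]
        rw [show List.take (1 + fitCount m (PySem.Chars.len w) ws) (w :: ws) = w :: ws from
          List.take_of_length_le (by rw [List.length_cons]; omega)]
        rw [show List.drop (1 + fitCount m (PySem.Chars.len w) ws) (w :: ws) = [] from
          List.drop_eq_nil_of_le (by rw [List.length_cons]; omega)]
        have hne : PySem.Chars.join [' '] (w :: ws) ≠ [] := J_ne_nil _ (by simp) hgood
        rw [filter_single, filter_pair, PySem.Chars.join_nil]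
        simp only [List.singleton_append] at *
        simp [hne]
      · -- genuine two-line split: identical lists on both sides
        rw [if_neg hall]
        rw [Nat.add_comm 1 (fitCount m (PySem.Chars.len w) ws)]
        rw [List.take_succ_cons, List.drop_succ_cons]
        simp
    · -- first word does not fit: A's first line stays empty, B splits at 0
      rw [if_neg h0]
      have hk0 : altSplit m (w :: ws) 0 0 = 0 := by rw [hA0, if_pos (by omega)]
      rw [hk0, List.take_zero, List.drop_zero]
      have hJw : PySem.Chars.join [' '] [w] = w := by simp [PySem.Chars.join_singleton]
      have hI : ([[], w] : List (List Char)) = [[], PySem.Chars.join [' '] [w]] := by rw [hJw]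
      rw [hI, phase2 m ws [] [w] (by simp)
        (by intro v hv; rw [List.mem_singleton] at hv; subst hv; exact hw) hgws]
      rw [PySem.Chars.join_nil]
      simp

-- ===== VERDICT (by name: the statement is the Claim_ definition above) =====
theorem format_subtitle_lines_spec : Claim_equal_format_subtitle_lines := by
  intro text m _
  show (((PySem.Chars.split₀ text.toList).foldl (fslStep m) [[]]).filter (fun l => !l.isEmpty)).map (fun l => String.ofList l)
      = ([PySem.Chars.join [' '] (List.take (altSplit m (PySem.Chars.split₀ text.toList) 0 0) (PySem.Chars.split₀ text.toList)),
          PySem.Chars.join [' '] (List.drop (altSplit m (PySem.Chars.split₀ text.toList) 0 0) (PySem.Chars.split₀ text.toList))].filter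
            (fun l => !l.isEmpty)).map (fun l => String.ofList l)
  exact congrArg _ (core m _ (split₀_good text.toList))
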